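-- pv_equiv track=rewrite | github.com/gagon/dino | lineup_app/utils/optimize_routing.py | generate_comb2
-- ===== SOURCE A (Python) =====
-- def generate_comb2(ro_data):
--     r=[[]]
--     for w,x in ro_data.items():
--         t = []
--         for y in x:
--             for i in r:
--                 t.append(i+[{"well":w,"route_name":y}])
--         r = t
--     return r
-- ===== SOURCE B (Python) =====
-- def generate_comb2(ro_data):
--     items = list(ro_data.items())
--     total = 1
--     for _, x in items:
--         total *= len(x)
--     result = []
--     for idx in range(total):
--         q = idx
--         comb = []
--         for w, x in items:
--             q, rem = divmod(q, len(x))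
--             comb.append({"well": w, "route_name": x[rem]})
--         result.append(comb)
--     return result
-- ===== Notes on version B (the rewrite author's own statement) =====
-- stated objective: alternative
-- what changed: B computes total = product of route-list lengths and decodes each combination directly from its ordinal index by repeated divmod (first well least-significant), instead of A's repeated rebuilding of growing partial-combination lists.
import Mathlib
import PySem

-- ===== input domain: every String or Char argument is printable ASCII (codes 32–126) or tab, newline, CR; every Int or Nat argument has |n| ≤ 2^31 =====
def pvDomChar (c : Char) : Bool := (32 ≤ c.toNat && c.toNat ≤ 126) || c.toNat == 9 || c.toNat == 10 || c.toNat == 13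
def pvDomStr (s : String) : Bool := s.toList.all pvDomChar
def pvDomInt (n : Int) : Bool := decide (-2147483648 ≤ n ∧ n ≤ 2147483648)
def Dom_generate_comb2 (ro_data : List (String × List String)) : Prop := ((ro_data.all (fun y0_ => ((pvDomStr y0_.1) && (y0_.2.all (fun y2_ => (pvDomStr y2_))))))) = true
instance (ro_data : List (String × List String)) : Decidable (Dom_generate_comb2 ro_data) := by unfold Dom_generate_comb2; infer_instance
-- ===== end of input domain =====

-- B replaces A's repeated list-growing accumulation by decoding each combination
-- directly from its ordinal index (first well = least-significant digit): alternative decomposition.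

-- ===== PORT A =====
-- r = [[]]; for w,x in ro_data.items(): t=[]; for y in x: for i in r: t.append(i+[{...}]); r=t
def generate_comb2 (ro_data : List (String × List String)) : List (List (List (String × String))) :=
  ro_data.foldl
    (fun r wx =>
      wx.2.foldl
        (fun t y => t ++ r.map (fun i => i ++ [[("well", wx.1), ("route_name", y)]]))
        [])
    [[]]

-- ===== PORT B =====
-- the inner 'for w,x in items: q,rem = divmod(q,len(x)); comb.append({...x[rem]...})' loop;
-- x[rem] is ported as getD with a dummy default — rem < len x on every reachable call (q < total).
def pvDecodeComb (items : List (String × List String)) (q : Nat) : List (List (String × String)) :=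
  match items with
  | [] => []
  | (w, x) :: rest =>
      [("well", w), ("route_name", x.getD (q % x.length) "")] :: pvDecodeComb rest (q / x.length)

-- total = product of the route-list lengths; result[idx] = decode of idx
def generate_comb2_alt (ro_data : List (String × List String)) : List (List (List (String × String))) :=
  let total := ro_data.foldl (fun acc wx => acc * wx.2.length) 1
  (List.range total).map (fun idx => pvDecodeComb ro_data idx)

-- ===== PRECONDITION & SPEC =====
def Spec_generate_comb2 (ro_data : List (String × List String)) (out : List (List (List (String × String)))) : Prop := out = generate_comb2_alt ro_data
instance (ro_data : List (String × List String)) (out : List (List (List (String × String)))) : Decidable (Spec_generate_comb2 ro_data out) := by unfold Spec_generate_comb2; infer_instance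

-- ===== CLAIM (what is proved, stated in full; the proofs are below) =====
def Claim_equal_generate_comb2 : Prop := ∀ (ro_data : List (String × List String)), Dom_generate_comb2 ro_data → Spec_generate_comb2 ro_data (generate_comb2 ro_data)

-- ===== LEMMAS AND PROOFS =====

-- product of the route-list lengths, structural form
def pvProd (l : List (String × List String)) : Nat :=
  match l with
  | [] => 1
  | p :: rest => p.2.length * pvProd rest

theorem pvProd_foldl (l : List (String × List String)) (a : Nat) :
    l.foldl (fun acc wx => acc * wx.2.length) a = a * pvProd l := by
  induction l generalizing a with
  | nil => simp [pvProd]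
  | cons p rest ih => simp [List.foldl_cons, ih, pvProd]; ring

theorem pvProd_append (l : List (String × List String)) (p : String × List String) :
    pvProd (l ++ [p]) = pvProd l * p.2.length := by
  induction l with
  | nil => simp [pvProd]
  | cons q rest ih => simp [pvProd, ih]; ring

-- decoding only depends on the index modulo the product of lengths
theorem pvDecodeComb_mod (l : List (String × List String)) (a i : Nat) :
    pvDecodeComb l (a * pvProd l + i) = pvDecodeComb l i := by
  induction l generalizing a i with
  | nil => rfl
  | cons p rest ih =>
    obtain ⟨w, x⟩ := p
    rcases Nat.eq_zero_or_pos x.length with h0 | hpos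
    · simp [pvProd, h0]
    · have hq : a * pvProd ((w, x) :: rest) + i = i + a * pvProd rest * x.length := by
        simp [pvProd]; ring
      have h1 : (i + a * pvProd rest * x.length) % x.length = i % x.length :=
        Nat.add_mul_mod_self_right i (a * pvProd rest) x.length
      have h2 : (i + a * pvProd rest * x.length) / x.length
          = a * pvProd rest + i / x.length := by
        rw [Nat.add_mul_div_right _ _ hpos]; ring
      simp [pvDecodeComb, hq, h1, h2, ih]

-- appending one well at the END adds the most-significant digit
theorem pvDecodeComb_append (l : List (String × List String)) (w : String)
    (x : List String) (q : Nat) :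
    pvDecodeComb (l ++ [(w, x)]) q
      = pvDecodeComb l q
        ++ [[("well", w), ("route_name", x.getD (q / pvProd l % x.length) "")]] := by
  induction l generalizing q with
  | nil => simp [pvDecodeComb, pvProd]
  | cons p rest ih =>
    obtain ⟨w', x'⟩ := p
    simp [pvDecodeComb, ih, pvProd, Nat.div_div_eq_div_mul]

-- range of a product splits into blocks
theorem range_mul_blocks (N L : Nat) :
    List.range (N * L) = (List.range L).flatMap (fun j => (List.range N).map (fun i => j * N + i)) := by
  induction L with
  | zero => simp
  | succ L ih =>
    rw [Nat.mul_succ, List.range_add, ih, List.range_succ]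
    simp [List.flatMap_append, Nat.mul_comm]

-- fold over the element list = fold over its index range (with getD access)
theorem flatMap_range_getD {α : Type} (x : List String)
    (g : String → List α) :
    x.flatMap g = (List.range x.length).flatMap (fun j => g (x.getD j "")) := by
  induction x with
  | nil => simp
  | cons y ys ih =>
    rw [List.length_cons, List.range_succ_eq_map]
    simp [List.flatMap_cons, ih, List.flatMap_map]

theorem generate_comb2_eq_range (l : List (String × List String)) :
    generate_comb2 l = (List.range (pvProd l)).map (fun q => pvDecodeComb l q) := by
  induction l using List.reverseRecOn with
  | nil => simp [generate_comb2, pvProd, List.range_succ, pvDecodeComb]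
  | append_singleton l p ih =>
    obtain ⟨w, x⟩ := p
    have hA : generate_comb2 (l ++ [(w, x)])
        = x.foldl (fun t y => t ++ (generate_comb2 l).map
            (fun i => i ++ [[("well", w), ("route_name", y)]])) [] := by
      simp [generate_comb2, List.foldl_append]
    rw [hA, PySem.List.foldl_append_eq_flatMap, List.nil_append, ih, pvProd_append]
    set N := pvProd l with hN
    rcases Nat.eq_zero_or_pos N with h0 | hpos
    · simp [h0]
    · simp only [List.map_map, Function.comp_def]
      rw [range_mul_blocks N x.length, List.map_flatMap,
        flatMap_range_getD x (fun y => (List.range N).map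
          (fun q => pvDecodeComb l q ++ [[("well", w), ("route_name", y)]]))]
      rw [List.flatMap_def, List.flatMap_def]
      congr 1
      apply List.map_congr_left
      intro j hj
      rw [List.mem_range] at hj
      rw [List.map_map]
      apply List.map_congr_left
      intro i hi
      rw [List.mem_range] at hi
      simp only [Function.comp_def]
      rw [pvDecodeComb_append, pvDecodeComb_mod l j i]
      have hdiv : (j * N + i) / pvProd l = j := by
        rw [← hN, Nat.mul_comm j N, Nat.mul_add_div hpos, Nat.div_eq_of_lt hi, Nat.add_zero]
      rw [hdiv, Nat.mod_eq_of_lt hj]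

-- ===== VERDICT (by name: the statement is the Claim_ definition above) =====
theorem generate_comb2_spec : Claim_equal_generate_comb2 := by
  intro l _
  unfold Spec_generate_comb2 generate_comb2_alt
  rw [generate_comb2_eq_range, pvProd_foldl, Nat.one_mul]
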